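-- pv_equiv track=rewrite | github.com/DemonCyborg007/Gfg_potd | 18th_Feb_Apple Sequences.py | appleSequences
-- ===== SOURCE A (Python) =====
-- def appleSequences(n, m, arr):
--     # code here
--     st=0;
--     end=0;
--     ans=0;
--     while(end!=n):
--         if(m>0):
--             if(arr[end]=='O'):
--                 m-=1;
--         else:
--             if(arr[end]=='O'):
--                 while(arr[st]!='O'):
--                     st+=1;
--                 st+=1;
--         ans=max(ans,end-st+1);
--         end+=1;
--     return ans;
-- ===== SOURCE B (Python) =====
-- def appleSequences(n, m, arr):
--     t = m if m > 0 else 0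
--     p = [i for i in range(n) if arr[i] == 'O']
--     if len(p) <= t:
--         return n
--     best = 0
--     for i in range(len(p) - t + 1):
--         left = p[i - 1] + 1 if i > 0 else 0
--         right = p[i + t] - 1 if i + t < len(p) else n - 1
--         best = max(best, right - left + 1)
--     return best
-- ===== Notes on version B (the rewrite author's own statement) =====
-- stated objective: alternative
-- what changed: A slides a window over all n indices mutating a start pointer and budget; B first collects the list of 'O' positions and, if more than max(m,0) of them exist, scans only the O-position windows, computing each candidate window from the neighbouring O positions in closed form.
import Mathlib
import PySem

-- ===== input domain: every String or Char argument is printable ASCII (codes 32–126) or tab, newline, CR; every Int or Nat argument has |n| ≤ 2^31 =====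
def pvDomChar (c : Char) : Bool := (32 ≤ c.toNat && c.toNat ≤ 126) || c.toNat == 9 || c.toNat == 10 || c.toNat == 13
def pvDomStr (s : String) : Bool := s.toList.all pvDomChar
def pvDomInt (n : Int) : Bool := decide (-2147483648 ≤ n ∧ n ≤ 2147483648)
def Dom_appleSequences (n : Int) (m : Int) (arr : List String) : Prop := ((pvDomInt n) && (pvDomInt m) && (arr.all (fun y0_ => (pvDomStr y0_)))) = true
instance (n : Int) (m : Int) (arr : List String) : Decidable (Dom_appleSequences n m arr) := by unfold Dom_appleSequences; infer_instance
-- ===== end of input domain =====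

-- B replaces A's sliding window by an O-positions/gap scan (a different decomposition, same cost);
-- equivalence of the RETURN value is proved on Pre_ (0 ≤ n ≤ len(arr)), exactly where A returns.

-- ===== PORT A =====
-- inner `while arr[st] != 'O': st += 1` of A; fuel bounds the walk (Python's walk stays
-- below `end < n` on every input Pre_ admits, so the fuel is never exhausted there)
def advSt (arr : List String) (st : Int) : Nat → Int
  | 0 => st
  | fuel + 1 =>
    if (PySem.List.pyGet? arr st).getD "" = "O" then st
    else advSt arr (st + 1) fuel

-- A's outer `while end != n` loop; written with `end < n` so the port is total
-- (for end > n Python diverges/raises, which Pre_ excludes)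
def loopA (arr : List String) (n st m ans endv : Int) : Int :=
  if h : endv < n then
    let c := (PySem.List.pyGet? arr endv).getD ""
    if m > 0 then
      let m' := if c = "O" then m - 1 else m
      loopA arr n st m' (max ans (endv - st + 1)) (endv + 1)
    else
      let st' := if c = "O" then advSt arr st (n - st).toNat + 1 else st
      loopA arr n st' m (max ans (endv - st' + 1)) (endv + 1)
  else ans
termination_by (n - endv).toNat
decreasing_by all_goals omega

def appleSequences (n : Int) (m : Int) (arr : List String) : Int :=
  loopA arr n 0 m 0 0

-- ===== PORT B =====
def appleSequences_alt (n : Int) (m : Int) (arr : List String) : Int :=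
  let t : Int := if m > 0 then m else 0
  let p : List Int := (PySem.List.pyRange 0 n 1).filter
    (fun i => (PySem.List.pyGet? arr i).getD "" == "O")
  if (p.length : Int) ≤ t then n
  else
    (PySem.List.pyRange 0 ((p.length : Int) - t + 1) 1).foldl
      (fun best i =>
        let left : Int := if i > 0 then PySem.List.pyGetD p (i - 1) 0 + 1 else 0
        let right : Int := if i + t < (p.length : Int) then PySem.List.pyGetD p (i + t) 0 - 1 else n - 1
        max best (right - left + 1)) 0

-- ===== PRECONDITION & SPEC =====
-- Pre_: exactly the inputs where Python A returns normally: for n > len(arr) it raises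
-- IndexError, and for n < 0 the loop runs past the end of arr and raises IndexError.
def Pre_appleSequences (n : Int) (m : Int) (arr : List String) : Prop :=
  0 ≤ n ∧ n ≤ arr.length
instance (n : Int) (m : Int) (arr : List String) : Decidable (Pre_appleSequences n m arr) := by
  unfold Pre_appleSequences; infer_instance

def pvWitness_appleSequences : Int × Int × List String := (5, 1, ["O", "A", "O", "A", "A"])

def Spec_appleSequences (n : Int) (m : Int) (arr : List String) (out : Int) : Prop := out = appleSequences_alt n m arr
instance (n : Int) (m : Int) (arr : List String) (out : Int) : Decidable (Spec_appleSequences n m arr out) := by unfold Spec_appleSequences; infer_instance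

-- ===== CLAIM (what is proved, stated in full; the proofs are below) =====
def Claim_equal_appleSequences : Prop := ∀ (n : Int) (m : Int) (arr : List String), Dom_appleSequences n m arr → Pre_appleSequences n m arr → Spec_appleSequences n m arr (appleSequences n m arr)

-- ===== LEMMAS AND PROOFS =====

-- proof-side vocabulary: `predO` tests for 'O', `poss arr e` are the O-positions below e,
-- `cnt arr e` the number of O's below e; `stN` A's window start as a function of that count;
-- `gE` the window length A records at end-index e; `hI` B's window length at O-window i.
def predO (arr : List String) (i : Nat) : Bool := arr.getD i "" == "O"
def poss (arr : List String) (e : Nat) : List Nat := (List.range e).filter (predO arr)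
def cnt (arr : List String) (e : Nat) : Nat := (poss arr e).length
def stN (arr : List String) (N t k : Nat) : Nat :=
  if k ≤ t then 0 else (poss arr N).getD (k - t - 1) 0 + 1
def gE (arr : List String) (N t e : Nat) : Int :=
  (e : Int) - (stN arr N t (cnt arr (e + 1)) : Int) + 1
def hI (arr : List String) (N t i : Nat) : Int :=
  (if i + t < cnt arr N then ((poss arr N).getD (i + t) 0 : Int) - 1 else (N : Int) - 1)
  - (if 0 < i then ((poss arr N).getD (i - 1) 0 : Int) + 1 else 0) + 1

lemma range_split (e N : Nat) (h : e ≤ N) :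
    List.range N = List.range e ++ List.range' e (N - e) := by
  rw [List.range_eq_range', List.range_eq_range']
  have h2 := List.range'_append (s := 0) (m := e) (n := N - e) (step := 1)
  simp at h2
  rw [h2]; congr 1; omega

lemma poss_split (arr : List String) (e N : Nat) (h : e ≤ N) :
    poss arr N = poss arr e ++ (List.range' e (N - e)).filter (predO arr) := by
  unfold poss
  rw [range_split e N h, List.filter_append]

lemma cnt_le (arr : List String) (e N : Nat) (h : e ≤ N) : cnt arr e ≤ cnt arr N := by
  unfold cnt
  rw [poss_split arr e N h, List.length_append]
  omega

lemma cnt_succ (arr : List String) (e : Nat) :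
    cnt arr (e + 1) = cnt arr e + if predO arr e then 1 else 0 := by
  unfold cnt poss
  rw [List.range_succ, List.filter_append, List.length_append]
  by_cases h : predO arr e <;> simp [h]

lemma poss_sorted (arr : List String) (N : Nat) : (poss arr N).Pairwise (· < ·) := by
  exact List.Pairwise.filter _ List.pairwise_lt_range

lemma poss_mem (arr : List String) (N x : Nat) (hx : x ∈ poss arr N) :
    x < N ∧ predO arr x = true := by
  unfold poss at hx
  rw [List.mem_filter, List.mem_range] at hx
  exact hx

lemma mem_poss (arr : List String) (N x : Nat) (h1 : x < N) (h2 : predO arr x = true) :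
    x ∈ poss arr N := by
  unfold poss
  rw [List.mem_filter, List.mem_range]
  exact ⟨h1, h2⟩

lemma poss_getD_mem (arr : List String) (N j : Nat) (hj : j < cnt arr N) :
    (poss arr N).getD j 0 ∈ poss arr N := by
  rw [List.getD_eq_getElem _ 0 hj]
  exact List.getElem_mem hj

lemma poss_getD_strict (arr : List String) (N i j : Nat) (hij : i < j) (hj : j < cnt arr N) :
    (poss arr N).getD i 0 < (poss arr N).getD j 0 := by
  have hi : i < cnt arr N := lt_trans hij hj
  rw [List.getD_eq_getElem _ 0 hi, List.getD_eq_getElem _ 0 hj]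
  exact List.pairwise_iff_getElem.mp (poss_sorted arr N) i j hi hj hij

lemma poss_getD_lt_of_lt_cnt (arr : List String) (N e j : Nat) (he : e ≤ N)
    (hj : j < cnt arr e) : (poss arr N).getD j 0 < e := by
  have hsplit := poss_split arr e N he
  have hlen : j < (poss arr e).length := hj
  have : (poss arr N).getD j 0 = (poss arr e).getD j 0 := by
    rw [hsplit, List.getD_eq_getElem?_getD, List.getD_eq_getElem?_getD,
      List.getElem?_append_left hlen]
  rw [this, List.getD_eq_getElem _ 0 hlen]
  exact (poss_mem arr e _ (List.getElem_mem hlen)).1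

lemma le_poss_getD_of_cnt_le (arr : List String) (N e j : Nat) (he : e ≤ N)
    (hj1 : cnt arr e ≤ j) : e ≤ (poss arr N).getD j 0 ∨ cnt arr N ≤ j := by
  by_cases hj2 : j < cnt arr N
  · left
    have hsplit := poss_split arr e N he
    have hlen : j < (poss arr N).length := hj2
    rw [List.getD_eq_getElem _ 0 hlen]
    have hget : (poss arr N)[j] ∈ (List.range' e (N - e)).filter (predO arr) := by
      have : (poss arr N)[j] = ((poss arr e ++ (List.range' e (N - e)).filter (predO arr)))[j]'(by rw [← hsplit]; exact hlen) := by
        congr 1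
      rw [this, List.getElem_append_right (by exact hj1)]
      exact List.getElem_mem _
    have := (List.mem_filter.mp hget).1
    rw [List.mem_range'] at this
    obtain ⟨i, _, hi⟩ := this
    omega
  · right; omega

lemma getD_append_length {α : Type} [Inhabited α] (l1 l2 : List α) (x : α) :
    (l1 ++ x :: l2).getD l1.length default = x := by
  rw [List.getD_eq_getElem?_getD, List.getElem?_append_right (by omega)]
  simp

lemma poss_getD_cnt (arr : List String) (N e : Nat) (he : e < N) (hp : predO arr e = true) :
    (poss arr N).getD (cnt arr e) 0 = e := by
  have hsplit := poss_split arr e N (le_of_lt he)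
  have hNe : N - e = (N - e - 1) + 1 := by omega
  have hr : List.range' e (N - e) = e :: List.range' (e + 1) (N - e - 1) := by
    rw [hNe]
    have := List.range'_succ (s := e) (n := N - e - 1) (step := 1)
    simpa using this
  rw [hsplit, hr, List.filter_cons_of_pos hp]
  exact getD_append_length _ _ _

lemma cnt_poss_getD (arr : List String) (N j : Nat) (hj : j < cnt arr N) :
    cnt arr ((poss arr N).getD j 0) = j := by
  set x := (poss arr N).getD j 0 with hx
  have hmem : x ∈ poss arr N := poss_getD_mem arr N j hj
  obtain ⟨hxN, hxp⟩ := poss_mem arr N x hmem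
  have hle : cnt arr x ≤ j := by
    by_contra h
    have h2 : j < cnt arr x := by omega
    have := poss_getD_lt_of_lt_cnt arr N x j (le_of_lt hxN) h2
    omega
  rcases Nat.eq_or_lt_of_le hle with h | h
  · omega
  · exfalso
    have hq6 := poss_getD_cnt arr N x hxN hxp
    have := poss_getD_strict arr N (cnt arr x) j h hj
    omega

lemma advSt_eq (arr : List String) (N : Nat) (hN : N ≤ arr.length) :
    ∀ (fuel s j : Nat), s ≤ j → j < N → predO arr j = true →
      (∀ i, s ≤ i → i < j → predO arr i = false) → j - s < fuel →
      advSt arr (s : Int) fuel = (j : Int) := by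
  intro fuel
  induction fuel with
  | zero => intro s j _ _ _ _ hf; omega
  | succ f ih =>
    intro s j hsj hjN hOj hmin hf
    have hsN : s < N := lt_of_le_of_lt hsj hjN
    have hget : PySem.List.pyGet? arr (s : Int) = some (arr.getD s "") := by
      rw [PySem.List.pyGet?_natCast, List.getD_eq_getElem?_getD]
      rw [List.getElem?_eq_getElem (by omega)]
      simp
    rcases Nat.eq_or_lt_of_le hsj with heq | hlt
    · have hO : arr.getD s "" = "O" := by
        subst heq
        unfold predO at hOj
        exact of_decide_eq_true hOj
      rw [advSt, hget]
      simp only [Option.getD_some]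
      rw [if_pos hO, heq]
    · have hO : ¬ arr.getD s "" = "O" := by
        have := hmin s (le_refl s) hlt
        unfold predO at this
        simpa using this
      rw [advSt, hget]
      simp only [Option.getD_some, if_neg hO]
      have : ((s : Int) + 1) = ((s + 1 : Nat) : Int) := by push_cast; ring
      rw [this]
      exact ih (s + 1) j hlt hjN hOj (fun i h1 h2 => hmin i (by omega) h2) (by omega)

lemma foldl_max_le {α : Type} (l : List α) (f : α → Int) (init c : Int) (h0 : init ≤ c)
    (h : ∀ x ∈ l, f x ≤ c) : l.foldl (fun a x => max a (f x)) init ≤ c := by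
  induction l generalizing init with
  | nil => exact h0
  | cons x t ih =>
    simp only [List.foldl_cons]
    exact ih _ (max_le h0 (h x List.mem_cons_self)) (fun y hy => h y (List.mem_cons_of_mem x hy))

lemma pyGetD_at (arr : List String) (e : Nat) :
    (PySem.List.pyGet? arr (e : Int)).getD "" = arr.getD e "" := by
  rw [PySem.List.pyGet?_natCast, List.getD_eq_getElem?_getD]

lemma predO_iff (arr : List String) (e : Nat) :
    predO arr e = true ↔ arr.getD e "" = "O" := by
  unfold predO
  exact beq_iff_eq

-- the first O-position at or after A's current window start is the (k-t)-th O overall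
lemma advSt_step (arr : List String) (N : Nat) (hN : N ≤ arr.length) (t k : Nat)
    (hkt : t ≤ k) (hkc : k < cnt arr N) :
    advSt arr ((stN arr N t k : Nat) : Int) ((N : Int) - (stN arr N t k : Nat)).toNat
      = (((poss arr N).getD (k - t) 0 : Nat) : Int) := by
  set j := (poss arr N).getD (k - t) 0 with hj
  have hjc : k - t < cnt arr N := by omega
  have hjmem := poss_getD_mem arr N (k - t) hjc
  obtain ⟨hjN, hjO⟩ := poss_mem arr N j hjmem
  have hs_le : stN arr N t k ≤ j := by
    unfold stN
    by_cases h : k ≤ t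
    · simp [h]
    · rw [if_neg h]
      have := poss_getD_strict arr N (k - t - 1) (k - t) (by omega) hjc
      omega
  have hmin : ∀ i, stN arr N t k ≤ i → i < j → predO arr i = false := by
    intro i h1 h2
    by_contra hcon
    have hO : predO arr i = true := by
      cases hp : predO arr i
      · exact absurd hp hcon
      · rfl
    have hiN : i < N := lt_trans h2 hjN
    have hmem : i ∈ poss arr N := mem_poss arr N i hiN hO
    obtain ⟨idx, hidx, hidx_eq⟩ := List.mem_iff_getElem.mp hmem
    have hidx_getD : (poss arr N).getD idx 0 = i := by
      rw [List.getD_eq_getElem _ 0 hidx, hidx_eq]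
    have hidx_lt : idx < k - t := by
      by_contra hge
      have hge : k - t ≤ idx := by omega
      rcases Nat.eq_or_lt_of_le hge with he | hlt
      · rw [← he] at hidx_getD; omega
      · have := poss_getD_strict arr N (k - t) idx hlt hidx
        omega
    have hkt' : ¬ (k ≤ t) := by omega
    have hst : stN arr N t k = (poss arr N).getD (k - t - 1) 0 + 1 := by
      unfold stN; rw [if_neg hkt']
    rcases Nat.eq_or_lt_of_le (by omega : idx ≤ k - t - 1) with he | hlt
    · rw [he] at hidx_getD; omega
    · have := poss_getD_strict arr N idx (k - t - 1) hlt (by omega)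
      omega
  have hfuel : (((N : Int) - (stN arr N t k : Nat)).toNat) = N - stN arr N t k := by omega
  rw [hfuel]
  exact advSt_eq arr N hN (N - stN arr N t k) (stN arr N t k) j hs_le hjN hjO hmin (by omega)

lemma loopA_inv (arr : List String) (N : Nat) (hN : N ≤ arr.length) (m : Int) :
    ∀ (d e : Nat) (m_cur ans : Int), e + d = N →
      m_cur = (if 0 < m then m - ((min (cnt arr e) m.toNat : Nat) : Int) else m) →
      loopA arr (N : Int) ((stN arr N m.toNat (cnt arr e) : Nat) : Int) m_cur ans (e : Int)
        = (List.range' e d).foldl (fun acc e' => max acc (gE arr N m.toNat e')) ans := by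
  intro d
  induction d with
  | zero =>
    intro e m_cur ans he hm
    rw [loopA, dif_neg (by omega), List.range'_zero, List.foldl_nil]
  | succ d ih =>
    intro e m_cur ans he hm
    have heN : e < N := by omega
    set t := m.toNat with ht
    set k := cnt arr e with hk
    have hkN : cnt arr (e + 1) ≤ cnt arr N := cnt_le arr (e + 1) N (by omega)
    have hr : List.range' e (d + 1) = e :: List.range' (e + 1) d := by
      have := List.range'_succ (s := e) (n := d) (step := 1)
      simpa using this
    have hcast : ((e : Int) + 1) = ((e + 1 : Nat) : Int) := by push_cast; ring
    rw [loopA, dif_pos (by exact_mod_cast heN), hr, List.foldl_cons]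
    simp only [pyGetD_at arr e]
    by_cases hmc : m_cur > 0
    · -- budget still positive: k < t, window start stays 0
      have hm_pos : 0 < m := by
        by_contra h
        rw [if_neg h] at hm
        omega
      rw [if_pos hm_pos] at hm
      have htm : (t : Int) = m := by omega
      have hklt : k < t := by
        by_contra h
        have : min k t = t := by omega
        rw [this] at hm
        omega
      have hst0 : stN arr N t k = 0 := by unfold stN; rw [if_pos (by omega)]
      rw [if_pos hmc]
      by_cases hO : predO arr e = true
      · have hOs : arr.getD e "" = "O" := (predO_iff arr e).mp hO
        have hc1 : cnt arr (e + 1) = k + 1 := by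
          have h2 := cnt_succ arr e
          rw [hO] at h2
          simp at h2
          omega
        have hst1 : stN arr N t (cnt arr (e + 1)) = 0 := by
          unfold stN; rw [hc1, if_pos (by omega)]
        have hg : gE arr N t e = (e : Int) - ((stN arr N t k : Nat) : Int) + 1 := by
          unfold gE; rw [hst1, hst0]
        rw [if_pos hOs, ← hg]
        have hih := ih (e + 1) (m_cur - 1) (max ans (gE arr N t e)) (by omega)
          (by rw [if_pos hm_pos, hc1]
              rw [show min (k + 1) t = min k t + 1 by omega]
              push_cast
              omega)
        rw [hst1] at hih
        rw [hst0, hcast]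
        exact hih
      · have hOf : predO arr e = false := by simpa using hO
        have hOs : ¬ arr.getD e "" = "O" := fun h => hO ((predO_iff arr e).mpr h)
        have hc1 : cnt arr (e + 1) = k := by
          have h2 := cnt_succ arr e
          rw [hOf] at h2
          simp at h2
          omega
        have hst1 : stN arr N t (cnt arr (e + 1)) = 0 := by
          unfold stN; rw [hc1, if_pos (by omega)]
        have hg : gE arr N t e = (e : Int) - ((stN arr N t k : Nat) : Int) + 1 := by
          unfold gE; rw [hst1, hst0]
        rw [if_neg hOs, ← hg]
        have hih := ih (e + 1) m_cur (max ans (gE arr N t e)) (by omega)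
          (by rw [if_pos hm_pos, hc1]; exact hm)
        rw [hst1] at hih
        rw [hst0, hcast]
        exact hih
    · -- budget exhausted: t ≤ k
      have hkt : t ≤ k := by
        by_cases h : 0 < m
        · rw [if_pos h] at hm
          have htm : (t : Int) = m := by omega
          by_contra hc
          have : min k t = k := by omega
          rw [this] at hm
          omega
        · have : t = 0 := by omega
          omega
      rw [if_neg hmc]
      have hm1 : m_cur = (if 0 < m then m - ((min (cnt arr (e + 1)) m.toNat : Nat) : Int) else m) := by
        by_cases h : 0 < m
        · rw [if_pos h] at hm ⊢
          have h2 := cnt_succ arr e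
          rw [show min (cnt arr (e + 1)) t = min k t by omega]
          exact hm
        · rw [if_neg h] at hm ⊢; exact hm
      by_cases hO : predO arr e = true
      · have hOs : arr.getD e "" = "O" := (predO_iff arr e).mp hO
        have hc1 : cnt arr (e + 1) = k + 1 := by
          have h2 := cnt_succ arr e
          rw [hO] at h2
          simp at h2
          omega
        have hkc : k < cnt arr N := by omega
        have hadv := advSt_step arr N hN t k hkt hkc
        have hst1 : stN arr N t (cnt arr (e + 1)) = (poss arr N).getD (k - t) 0 + 1 := by
          unfold stN
          rw [hc1, if_neg (by omega)]
          congr 2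
          omega
        have hg : gE arr N t e
            = (e : Int) - ((((poss arr N).getD (k - t) 0 : Nat) : Int) + 1) + 1 := by
          unfold gE
          rw [hst1]
          push_cast
          ring
        rw [if_pos hOs, hadv, ← hg]
        have hih := ih (e + 1) m_cur (max ans (gE arr N t e)) (by omega)
          (by rw [show cnt arr (e + 1) = k + 1 from hc1] at hm1 ⊢; exact hm1)
        rw [hst1] at hih
        rw [hcast]
        have hcast2 : ((((poss arr N).getD (k - t) 0 : Nat) : Int) + 1)
            = (((poss arr N).getD (k - t) 0 + 1 : Nat) : Int) := by push_cast; ring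
        rw [hcast2]
        exact hih
      · have hOf : predO arr e = false := by simpa using hO
        have hOs : ¬ arr.getD e "" = "O" := fun h => hO ((predO_iff arr e).mpr h)
        have hc1 : cnt arr (e + 1) = k := by
          have h2 := cnt_succ arr e
          rw [hOf] at h2
          simp at h2
          omega
        have hg : gE arr N t e = (e : Int) - ((stN arr N t k : Nat) : Int) + 1 := by
          unfold gE; rw [hc1]
        rw [if_neg hOs, ← hg]
        have hih := ih (e + 1) m_cur (max ans (gE arr N t e)) (by omega)
          (by rw [hc1]; exact hm)
        rw [hc1] at hih
        rw [hcast]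
        exact hih

lemma A_eq (arr : List String) (N : Nat) (hN : N ≤ arr.length) (m : Int) :
    appleSequences (N : Int) m arr
      = (List.range N).foldl (fun acc e => max acc (gE arr N m.toNat e)) 0 := by
  unfold appleSequences
  have h0 : cnt arr 0 = 0 := by unfold cnt poss; simp
  have hinv := loopA_inv arr N hN m N 0 m 0 (by omega)
    (by rw [h0]
        by_cases h : 0 < m
        · rw [if_pos h]; simp
        · rw [if_neg h])
  rw [h0] at hinv
  have hst : stN arr N m.toNat 0 = 0 := by unfold stN; rw [if_pos (by omega)]
  rw [hst] at hinv
  simpa [List.range_eq_range'] using hinv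

lemma B_eq (arr : List String) (N : Nat) (hN : N ≤ arr.length) (m : Int) :
    appleSequences_alt (N : Int) m arr =
      if cnt arr N ≤ m.toNat then (N : Int)
      else (List.range (cnt arr N - m.toNat + 1)).foldl
        (fun acc i => max acc (hI arr N m.toNat i)) 0 := by
  unfold appleSequences_alt
  have ht : (if m > 0 then m else (0 : Int)) = (m.toNat : Int) := by
    split_ifs with h <;> omega
  have hp : ((PySem.List.pyRange 0 (N : Int) 1).filter
      (fun i => (PySem.List.pyGet? arr i).getD "" == "O"))
      = (poss arr N).map (fun x : Nat => (x : Int)) := by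
    rw [PySem.List.pyRange_one]
    simp only [sub_zero, Int.toNat_natCast, zero_add]
    rw [List.filter_map]
    unfold poss
    congr 1
    apply List.filter_congr
    intro i _
    simp only [Function.comp_apply, pyGetD_at]
    rfl
  simp only [ht, hp, List.length_map]
  have hKlen : (poss arr N).length = cnt arr N := rfl
  rw [hKlen]
  set t := m.toNat with htt
  set K := cnt arr N with hK
  by_cases hle : K ≤ t
  · rw [if_pos (by exact_mod_cast hle), if_pos hle]
  · rw [if_neg (by exact_mod_cast hle), if_neg hle]
    have htK : t < K := by omega
    have hrange : ((K : Int) - (t : Int) + 1) = ((K - t + 1 : Nat) : Int) := by push_cast; omega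
    rw [hrange, PySem.List.pyRange_one]
    simp only [sub_zero, Int.toNat_natCast, zero_add]
    rw [List.foldl_map]
    apply PySem.List.foldl_congr_mem
    intro acc i hi
    rw [List.mem_range] at hi
    congr 1
    unfold hI
    have hgetD : ∀ j : Nat, j < K →
        PySem.List.pyGetD ((poss arr N).map (fun x : Nat => (x : Int))) (j : Int) 0
          = (((poss arr N).getD j 0 : Nat) : Int) := by
      intro j hj
      rw [PySem.List.pyGetD_natCast]
      rw [List.getD_eq_getElem?_getD, List.getD_eq_getElem?_getD]
      rw [List.getElem?_map]
      rw [List.getElem?_eq_getElem (by exact hj : j < (poss arr N).length)]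
      simp
    by_cases hi0 : 0 < i
    · rw [if_pos (by exact_mod_cast hi0 : (i : Int) > 0)]
      have h1 : ((i : Int) - 1) = ((i - 1 : Nat) : Int) := by omega
      have h2 : ((i : Int) + (t : Int)) = ((i + t : Nat) : Int) := by push_cast; ring
      rw [h1, h2, hgetD (i - 1) (by omega)]
      by_cases h3 : i + t < K
      · rw [if_pos (by exact_mod_cast h3), if_pos h3, hgetD (i + t) h3]
        simp [hi0]
      · rw [if_neg (by exact_mod_cast h3), if_neg h3]
        simp [hi0]
    · have hi0' : i = 0 := by omega
      rw [if_neg (by exact_mod_cast hi0 : ¬ ((i : Int) > 0)), if_neg hi0]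
      have h2 : ((i : Int) + (t : Int)) = ((i + t : Nat) : Int) := by push_cast; ring
      rw [h2]
      by_cases h3 : i + t < K
      · rw [if_pos (by exact_mod_cast h3), if_pos h3, hgetD (i + t) h3]
      · rw [if_neg (by exact_mod_cast h3), if_neg h3]

lemma main_eq (arr : List String) (N : Nat) (hN : N ≤ arr.length) (m : Int) :
    appleSequences (N : Int) m arr = appleSequences_alt (N : Int) m arr := by
  rw [A_eq arr N hN m, B_eq arr N hN m]
  set t := m.toNat with ht
  set K := cnt arr N with hK
  by_cases hle : K ≤ t
  · rw [if_pos hle]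
    apply le_antisymm
    · apply foldl_max_le _ _ _ _ (by omega)
      intro e he
      rw [List.mem_range] at he
      unfold gE
      omega
    · by_cases hN0 : N = 0
      · subst hN0; simp
      · have hmem : N - 1 ∈ List.range N := by rw [List.mem_range]; omega
        have hbound := (PySem.List.le_foldl_max_int (List.range N) (fun e => gE arr N t e) 0).2 _ hmem
        have hg : gE arr N t (N - 1) = (N : Int) := by
          unfold gE
          rw [show N - 1 + 1 = N by omega]
          rw [show stN arr N t (cnt arr N) = 0 by unfold stN; rw [if_pos hle]]
          push_cast
          omega
        rw [hg] at hbound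
        exact hbound
  · rw [if_neg hle]
    have htK : t < K := by omega
    apply le_antisymm
    · have h0B := (PySem.List.le_foldl_max_int (List.range (K - t + 1)) (fun i => hI arr N t i) 0).1
      apply foldl_max_le _ _ _ _ h0B
      intro e he
      rw [List.mem_range] at he
      set k := cnt arr (e + 1) with hk
      have hkK : k ≤ K := by
        have := cnt_le arr (e + 1) N (by omega)
        omega
      have himem : k - t ∈ List.range (K - t + 1) := by rw [List.mem_range]; omega
      have hiB := (PySem.List.le_foldl_max_int (List.range (K - t + 1)) (fun i => hI arr N t i) 0).2 _ himem
      refine le_trans ?_ hiB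
      show gE arr N t e ≤ hI arr N t (k - t)
      unfold gE hI
      rw [← hk]
      have hL : (if 0 < k - t then ((poss arr N).getD (k - t - 1) 0 : Int) + 1 else 0)
          = ((stN arr N t k : Nat) : Int) := by
        unfold stN
        by_cases hkt : k ≤ t
        · rw [if_neg (by omega), if_pos hkt]; simp
        · rw [if_pos (by omega), if_neg hkt]
          rw [show k - t - 1 = k - t - 1 by rfl]
          push_cast
          ring
      rw [hL]
      by_cases hiK : (k - t) + t < K
      · rw [if_pos hiK]
        have hcle : cnt arr (e + 1) ≤ k - t + t := by omega
        have hdisj := le_poss_getD_of_cnt_le arr N (e + 1) ((k - t) + t) (by omega) hcle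
        rcases hdisj with h | h
        · omega
        · omega
      · rw [if_neg hiK]
        omega
    · have h0A := (PySem.List.le_foldl_max_int (List.range N) (fun e => gE arr N t e) 0).1
      apply foldl_max_le _ _ _ _ h0A
      intro i hi
      rw [List.mem_range] at hi
      by_cases hIle : hI arr N t i ≤ 0
      · exact le_trans hIle h0A
      · have hIpos : 1 ≤ hI arr N t i := by omega
        have hq0 : 0 < K := by omega
        have hN1 : 1 ≤ N := by
          have := poss_mem arr N _ (poss_getD_mem arr N 0 hq0)
          omega
        by_cases hiK : i + t < K
        · set x := (poss arr N).getD (i + t) 0 with hx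
          have hxmem := poss_mem arr N x (poss_getD_mem arr N (i + t) hiK)
          have hx1 : 1 ≤ x := by
            by_contra hc
            have hx0 : x = 0 := by omega
            unfold hI at hIpos
            rw [if_pos hiK, ← hx, hx0] at hIpos
            by_cases h0i : 0 < i
            · rw [if_pos h0i] at hIpos; omega
            · rw [if_neg h0i] at hIpos; omega
          have hcx : cnt arr (x - 1 + 1) = i + t := by
            rw [show x - 1 + 1 = x by omega]
            exact cnt_poss_getD arr N (i + t) hiK
          have hmemA : x - 1 ∈ List.range N := by rw [List.mem_range]; omega
          have hbA := (PySem.List.le_foldl_max_int (List.range N) (fun e => gE arr N t e) 0).2 _ hmemA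
          refine le_trans (le_of_eq ?_) hbA
          show hI arr N t i = gE arr N t (x - 1)
          unfold gE hI
          rw [hcx, if_pos hiK, ← hx]
          have hstx : ((stN arr N t (i + t) : Nat) : Int)
              = (if 0 < i then ((poss arr N).getD (i - 1) 0 : Int) + 1 else 0) := by
            unfold stN
            by_cases h0i : 0 < i
            · rw [if_neg (by omega), if_pos h0i]
              rw [show i + t - t - 1 = i - 1 by omega]
              push_cast
              ring
            · rw [if_pos (by omega), if_neg h0i]
              simp
          rw [hstx]
          omega
        · have hit : i + t = K := by omega
          have hcx : cnt arr (N - 1 + 1) = i + t := by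
            rw [show N - 1 + 1 = N by omega, hit, hK]
          have hmemA : N - 1 ∈ List.range N := by rw [List.mem_range]; omega
          have hbA := (PySem.List.le_foldl_max_int (List.range N) (fun e => gE arr N t e) 0).2 _ hmemA
          refine le_trans (le_of_eq ?_) hbA
          show hI arr N t i = gE arr N t (N - 1)
          unfold gE hI
          rw [hcx, if_neg hiK]
          have h0i : 0 < i := by omega
          have hstx : ((stN arr N t (i + t) : Nat) : Int)
              = (if 0 < i then ((poss arr N).getD (i - 1) 0 : Int) + 1 else 0) := by
            unfold stN
            rw [if_neg (by omega), if_pos h0i]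
            rw [show i + t - t - 1 = i - 1 by omega]
            push_cast
            ring
          rw [hstx, if_pos h0i]
          omega

-- ===== VERDICT (by name: the statement is the Claim_ definition above) =====
theorem appleSequences_spec : Claim_equal_appleSequences := by
  intro n m arr _ hpre
  obtain ⟨h0, hlen⟩ := hpre
  unfold Spec_appleSequences
  have hn : n = ((n.toNat : Nat) : Int) := by omega
  rw [hn]
  exact main_eq arr n.toNat (by omega) m
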